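-- pv_equiv track=rewrite | github.com/Vartrixx/Projet_tipe | tipe/temps_duree.py | temps_duree
-- ===== SOURCE A (Python) =====
-- def temps_duree(tab_notes):
--    t2,n2 = tab_notes[1]
--    ecart = t2
--    l=[]
--    long_l=0
--    for temps,note in tab_notes:
--       if long_l == 0 or N_prec != note:
--          l.append((ecart,note))
--          long_l += 1
--       else:
--          dt,N = l[long_l - 1]
--          l[long_l - 1] = (dt + ecart,N)
--       N_prec = note
--    return l
-- ===== SOURCE B (Python) =====
-- def temps_duree(tab_notes):
--     ecart = tab_notes[1][0]
--     notes = [note for _, note in tab_notes]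
--     n = len(notes)
--     starts = [i for i in range(n) if i == 0 or notes[i] != notes[i - 1]]
--     ends = starts[1:] + [n]
--     return [((e - s) * ecart, notes[s]) for s, e in zip(starts, ends)]
-- ===== Notes on version B (the rewrite author's own statement) =====
-- stated objective: alternative
-- what changed: B replaces A's single-pass append-or-patch loop with prev-note state by an index-based staged computation: it collects the boundary indices where the note changes, pairs consecutive boundaries with zip, and emits each group's duration as an index difference times ecart.
import Mathlib
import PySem

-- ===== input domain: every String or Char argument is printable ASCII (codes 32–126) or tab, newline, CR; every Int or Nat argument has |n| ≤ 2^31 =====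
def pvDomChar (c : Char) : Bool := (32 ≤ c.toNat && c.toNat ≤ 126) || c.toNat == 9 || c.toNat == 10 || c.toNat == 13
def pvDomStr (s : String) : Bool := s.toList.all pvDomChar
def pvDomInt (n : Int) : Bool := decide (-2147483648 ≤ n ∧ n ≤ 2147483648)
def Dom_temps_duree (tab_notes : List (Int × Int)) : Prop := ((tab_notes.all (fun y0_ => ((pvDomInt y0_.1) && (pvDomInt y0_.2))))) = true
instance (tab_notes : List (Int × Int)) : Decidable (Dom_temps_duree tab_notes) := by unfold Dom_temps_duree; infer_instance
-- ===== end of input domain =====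

-- B replaces A's single-pass append-or-patch loop by a staged index computation
-- (boundary indices, zipped consecutive pairs, index differences times ecart):
-- a genuinely different decomposition, same O(n) cost.


-- ===== PORT A =====
-- A's loop body over the state (l, long_l, N_prec); N_prec is unbound before the first
-- iteration (Option, none), which Python never reads since long_l == 0 short-circuits.
def pvStepA (e : Int) (st : List (Int × Int) × Int × Option Int) (p : Int × Int) :
    List (Int × Int) × Int × Option Int :=
  if st.2.1 = 0 ∨ st.2.2 ≠ some p.2 then
    (st.1 ++ [(e, p.2)], st.2.1 + 1, some p.2)
  else
    match PySem.List.pyGet? st.1 (st.2.1 - 1) with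
    | some (dt, N) => (PySem.List.pySetD st.1 (st.2.1 - 1) (dt + e, N), st.2.1, some p.2)
    | none => (st.1, st.2.1, some p.2)  -- unreachable: long_l is always l's length

-- literal port of A: tab_notes[1] raises IndexError on lists shorter than 2 (excluded by Pre_).
def temps_duree (tab_notes : List (Int × Int)) : List (Int × Int) :=
  match PySem.List.pyGet? tab_notes 1 with
  | none => []   -- IndexError in Python; excluded by Pre_temps_duree
  | some (t2, _n2) =>
    let ecart := t2
    (tab_notes.foldl (pvStepA ecart) ([], (0 : Int), (none : Option Int))).1

-- ===== PORT B =====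
-- literal port of Source B, staged: notes column, boundary indices (Nat indices; every
-- Python index here is in range so getD with default 0 is exact; `or` short-circuits
-- so notes[i-1] is only read when i ≥ 1), zip of consecutive boundaries, final map.
def temps_duree_alt (tab_notes : List (Int × Int)) : List (Int × Int) :=
  match PySem.List.pyGet? tab_notes 1 with
  | none => []   -- IndexError in Python; excluded by Pre_temps_duree
  | some (ecart, _) =>
    let notes := tab_notes.map (·.2)
    let n := notes.length
    let starts := (List.range n).filter
      (fun i => i == 0 || notes.getD i 0 != notes.getD (i - 1) 0)
    let ends := starts.drop 1 ++ [n]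
    (starts.zip ends).map (fun se => (((se.2 : Int) - (se.1 : Int)) * ecart, notes.getD se.1 0))

-- ===== PRECONDITION & SPEC =====
-- A evaluates tab_notes[1] and raises IndexError on lists with fewer than 2 elements; Pre_ excludes exactly those.
def Pre_temps_duree (tab_notes : List (Int × Int)) : Prop := 2 ≤ tab_notes.length
instance (tab_notes : List (Int × Int)) : Decidable (Pre_temps_duree tab_notes) := by unfold Pre_temps_duree; infer_instance
def pvWitness_temps_duree : (List (Int × Int)) := [(1, 5), (1, 5), (1, 7)]

def Spec_temps_duree (tab_notes : List (Int × Int)) (out : List (Int × Int)) : Prop := out = temps_duree_alt tab_notes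
instance (tab_notes : List (Int × Int)) (out : List (Int × Int)) : Decidable (Spec_temps_duree tab_notes out) := by unfold Spec_temps_duree; infer_instance

-- ===== CLAIM (what is proved, stated in full; the proofs are below) =====
def Claim_equal_temps_duree : Prop := ∀ (tab_notes : List (Int × Int)), Dom_temps_duree tab_notes → Pre_temps_duree tab_notes → Spec_temps_duree tab_notes (temps_duree tab_notes)

-- ===== LEMMAS AND PROOFS =====

-- canonical run merge over the pair list (A's loop is proved equal to it)
def pvRun (e : Int) : Int → Int → List (Int × Int) → List (Int × Int)
  | cnt, cur, [] => [(cnt * e, cur)]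
  | cnt, cur, p :: rest =>
      if p.2 ≠ cur then (cnt * e, cur) :: pvRun e 1 p.2 rest
      else pvRun e (cnt + 1) cur rest

-- the same merge over the note column only (B is proved equal to it)
def pvRunN (e : Int) : Int → Int → List Int → List (Int × Int)
  | cnt, cur, [] => [(cnt * e, cur)]
  | cnt, cur, x :: xs =>
      if x ≠ cur then (cnt * e, cur) :: pvRunN e 1 x xs
      else pvRunN e (cnt + 1) cur xs

theorem pvRun_eq_pvRunN (e : Int) (l : List (Int × Int)) :
    ∀ cnt cur, pvRun e cnt cur l = pvRunN e cnt cur (l.map (·.2)) := by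
  induction l with
  | nil => intro cnt cur; rfl
  | cons p rest ih =>
    intro cnt cur
    by_cases h : p.2 = cur <;> simp [pvRun, pvRunN, h, ih]

theorem pvSet_append_length {α : Type} (l : List α) (x v : α) :
    (l ++ [x]).set l.length v = l ++ [v] := by
  induction l with
  | nil => rfl
  | cons a l ih => simp [ih]

theorem pvA_loop (e : Int) (rest : List (Int × Int)) :
    ∀ (l : List (Int × Int)) (cnt n : Int),
    (rest.foldl (pvStepA e) (l ++ [(cnt * e, n)], (l.length : Int) + 1, some n)).1
    = l ++ pvRun e cnt n rest := by
  induction rest with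
  | nil => intro l cnt n; simp [pvRun]
  | cons p rest ih =>
    intro l cnt n
    rw [List.foldl_cons]
    by_cases h : p.2 = n
    · -- same note: the else branch patches the last element in place
      have hget : PySem.List.pyGet? (l ++ [(cnt * e, n)]) ((l.length : Int) + 1 - 1)
          = some (cnt * e, n) := by
        have h1 : ((l.length : Int) + 1 - 1) = (l.length : Int) := by omega
        rw [h1]; exact PySem.List.pyGet?_append_length l [] (cnt * e, n)
      have hset : PySem.List.pySetD (l ++ [(cnt * e, n)]) ((l.length : Int) + 1 - 1)
          (cnt * e + e, n) = l ++ [((cnt + 1) * e, n)] := by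
        have h1 : ((l.length : Int) + 1 - 1) = ((l.length : Nat) : Int) := by omega
        rw [h1, PySem.List.pySetD_natCast, pvSet_append_length]
        ring_nf
      have hcond : ¬ ((l.length : Int) + 1 = 0 ∨ (some n : Option Int) ≠ some n) := by
        exact fun hh => hh.elim (by omega) (fun hn => hn rfl)
      have hs : pvStepA e (l ++ [(cnt * e, n)], (l.length : Int) + 1, some n) p
          = (l ++ [((cnt + 1) * e, n)], (l.length : Int) + 1, some p.2) := by
        simp only [pvStepA, h, hget, hset]
        rw [if_neg hcond]
      rw [hs, h, ih l (cnt + 1) n]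
      simp [pvRun, h]
    · -- new note: append a fresh group
      have hc : ((l.length : Int) + 1 = 0 ∨ (some n : Option Int) ≠ some p.2) := by
        exact Or.inr (fun hh => h ((Option.some_inj.mp hh).symm))
      have hs : pvStepA e (l ++ [(cnt * e, n)], (l.length : Int) + 1, some n) p
          = ((l ++ [(cnt * e, n)]) ++ [(e, p.2)], (l.length : Int) + 1 + 1, some p.2) := by
        simp only [pvStepA]
        rw [if_pos hc]
      rw [hs]
      have harith : ((l.length : Int) + 1 + 1) = (((l ++ [(cnt * e, n)]).length : Nat) : Int) + 1 := by
        simp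
      have hone : ((1 : Int) * e, p.2) = (e, p.2) := by rw [one_mul]
      have := ih (l ++ [(cnt * e, n)]) 1 p.2
      rw [hone, ← harith] at this
      rw [this]
      simp [pvRun, h]

-- B-side: the change points of t relative to a previous value
def pvChg (prev : Int) : List Int → List Nat
  | [] => []
  | x :: xs => (if x ≠ prev then [0] else []) ++ (pvChg x xs).map (· + 1)

theorem pvChg_range (t : List Int) :
    ∀ prev, (List.range t.length).filter
        (fun j => t.getD j 0 != (prev :: t).getD j 0) = pvChg prev t := by
  induction t with
  | nil => intro prev; rfl
  | cons x xs ih =>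
    intro prev
    rw [show (x :: xs).length = xs.length + 1 from rfl, List.range_succ_eq_map,
        List.filter_cons, List.filter_map]
    have hq : ((fun j => (x :: xs).getD j 0 != (prev :: x :: xs).getD j 0) ∘ Nat.succ)
        = fun k => xs.getD k 0 != (x :: xs).getD k 0 := by
      funext k; simp [Function.comp]
    rw [hq, ih x]
    by_cases h : x = prev <;> simp [pvChg, h]

-- the boundary-index list of a nonempty note column
theorem pvStarts_cons (a : Int) (t : List Int) :
    (List.range (a :: t).length).filter
        (fun i => i == 0 || (a :: t).getD i 0 != (a :: t).getD (i - 1) 0)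
      = 0 :: (pvChg a t).map (· + 1) := by
  rw [show (a :: t).length = t.length + 1 from rfl, List.range_succ_eq_map,
      List.filter_cons, List.filter_map]
  have hq : ((fun i => i == 0 || (a :: t).getD i 0 != (a :: t).getD (i - 1) 0) ∘ Nat.succ)
      = fun k => t.getD k 0 != (a :: t).getD k 0 := by
    funext k; simp [Function.comp]
  rw [hq, pvChg_range t a]
  simp

-- zip of consecutive starts, written recursively
def pvOut (e : Int) (notes : List Int) : List Nat → Nat → Nat → List (Int × Int)
  | [], s0, n => [(((n : Int) - (s0 : Int)) * e, notes.getD s0 0)]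
  | s1 :: S, s0, n => (((s1 : Int) - (s0 : Int)) * e, notes.getD s0 0) :: pvOut e notes S s1 n

theorem pvZip_eq_pvOut (e : Int) (notes : List Int) (n : Nat) :
    ∀ (S : List Nat) (s0 : Nat),
    (((s0 :: S).zip ((s0 :: S).drop 1 ++ [n])).map
        (fun se => (((se.2 : Int) - (se.1 : Int)) * e, notes.getD se.1 0)))
      = pvOut e notes S s0 n := by
  intro S
  induction S with
  | nil => intro s0; simp [pvOut]
  | cons s1 S ih => intro s0; simp [pvOut, ← ih s1]

theorem pvOut_eq_pvRunN (e : Int) :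
    ∀ (t pre : List Int) (a : Int) (s0 : Nat),
    s0 < pre.length → (pre ++ t).getD s0 0 = a →
    pvOut e (pre ++ t) ((pvChg a t).map (· + pre.length)) s0 (pre ++ t).length
      = pvRunN e ((pre.length - s0 : Nat) : Int) a t := by
  intro t
  induction t with
  | nil =>
    intro pre a s0 hs hget
    have hc : ((pre.length : Int) - (s0 : Int)) = ((pre.length - s0 : Nat) : Int) := by omega
    simp only [List.append_nil] at hget
    simp only [pvChg, List.map_nil, pvOut, pvRunN, List.append_nil, hc, hget]
  | cons x xs ih =>
    intro pre a s0 hs hget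
    have hre : pre ++ x :: xs = (pre ++ [x]) ++ xs := by simp
    by_cases h : x = a
    · -- same note: no boundary here, the run grows
      have hchg : pvChg a (x :: xs) = (pvChg a xs).map (· + 1) := by
        simp [pvChg, h]
      rw [hchg, List.map_map]
      have hmap : (pvChg a xs).map ((· + pre.length) ∘ (· + 1))
          = (pvChg a xs).map (· + (pre ++ [x]).length) := by
        apply List.map_congr_left; intro j _; simp [Function.comp]; omega
      have hget' : ((pre ++ [x]) ++ xs).getD s0 0 = a := by rw [← hre]; exact hget
      have := ih (pre ++ [x]) a s0 (by simp; omega) hget'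
      rw [hmap, hre, this]
      have hcnt : (((pre ++ [x]).length - s0 : Nat) : Int)
          = ((pre.length - s0 : Nat) : Int) + 1 := by simp; omega
      rw [hcnt]
      simp [pvRunN, h]
    · -- boundary: close the current group at index pre.length
      have hchg : pvChg a (x :: xs) = 0 :: (pvChg x xs).map (· + 1) := by
        simp [pvChg, h]
      rw [hchg]
      simp only [List.map_cons, List.map_map, Nat.zero_add, pvOut]
      have hmap : (pvChg x xs).map ((· + pre.length) ∘ (· + 1))
          = (pvChg x xs).map (· + (pre ++ [x]).length) := by
        apply List.map_congr_left; intro j _; simp [Function.comp]; omega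
      have hget' : ((pre ++ [x]) ++ xs).getD pre.length 0 = x := by
        have hlt : pre.length < (pre ++ [x]).length := by simp
        rw [List.getD_append _ _ _ _ hlt, List.getD_append_right _ _ _ _ (le_refl _)]
        simp
      have := ih (pre ++ [x]) x pre.length (by simp) hget'
      rw [hmap, hre, this]
      have hc1 : (((pre ++ [x]).length - pre.length : Nat) : Int) = 1 := by simp
      have hc2 : ((pre.length : Int) - (s0 : Int)) = ((pre.length - s0 : Nat) : Int) := by
        omega
      have hg : (pre ++ x :: xs).getD s0 0 = a := hget
      rw [hc1, hc2, ← hre, hg]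
      simp [pvRunN, h]

-- ===== VERDICT (by name: the statement is the Claim_ definition above) =====
theorem temps_duree_spec : Claim_equal_temps_duree := by
  intro tab hdom hpre
  unfold Spec_temps_duree temps_duree temps_duree_alt
  match tab, hpre with
  | (t0, n0) :: (t1, n1) :: rest, _ =>
    have h1 : PySem.List.pyGet? ((t0, n0) :: (t1, n1) :: rest) 1 = some (t1, n1) := by
      simp [PySem.List.pyGet?, PySem.List.pyIdx?]
    rw [h1]
    -- A side: the first iteration takes the long_l == 0 branch, leaving state ([(e,n0)], 1, n0)
    have hs0 : pvStepA t1 ([], (0 : Int), (none : Option Int)) (t0, n0)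
        = ([] ++ [((1 : Int) * t1, n0)], ((List.length ([] : List (Int × Int)) : Int)) + 1, some n0) := by
      simp [pvStepA]
    have hA : (((t0, n0) :: (t1, n1) :: rest).foldl (pvStepA t1)
        ([], (0 : Int), (none : Option Int))).1 = [] ++ pvRun t1 1 n0 ((t1, n1) :: rest) := by
      rw [List.foldl_cons, hs0]
      exact pvA_loop t1 ((t1, n1) :: rest) [] 1 n0
    -- B side: starts = 0 :: shifted change points, then the recursive zip form, then pvRunN
    set notes : List Int := (((t0, n0) :: (t1, n1) :: rest).map (·.2)) with hnotes
    have hnc : notes = n0 :: ((t1, n1) :: rest).map (·.2) := by simp [hnotes]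
    have hstarts : (List.range notes.length).filter
        (fun i => i == 0 || notes.getD i 0 != notes.getD (i - 1) 0)
        = 0 :: (pvChg n0 (((t1, n1) :: rest).map (·.2))).map (· + 1) := by
      rw [hnc]; exact pvStarts_cons n0 _
    have hB1 := pvZip_eq_pvOut t1 notes notes.length
      ((pvChg n0 (((t1, n1) :: rest).map (·.2))).map (· + 1)) 0
    have hmap1 : (pvChg n0 (((t1, n1) :: rest).map (·.2))).map (· + 1)
        = (pvChg n0 (((t1, n1) :: rest).map (·.2))).map (· + ([n0] : List Int).length) := by
      simp
    have hpre' : notes = [n0] ++ ((t1, n1) :: rest).map (·.2) := by rw [hnc]; rfl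
    have hB2 := pvOut_eq_pvRunN t1 (((t1, n1) :: rest).map (·.2)) [n0] n0 0
      (by simp) (by simp)
    simp only []
    rw [hA, hstarts, hB1, hmap1]
    have hfix : (pvOut t1 notes ((pvChg n0 (((t1, n1) :: rest).map (·.2))).map
          (· + ([n0] : List Int).length)) 0 notes.length)
        = (pvOut t1 ([n0] ++ ((t1, n1) :: rest).map (·.2))
          ((pvChg n0 (((t1, n1) :: rest).map (·.2))).map (· + ([n0] : List Int).length)) 0
          ([n0] ++ ((t1, n1) :: rest).map (·.2)).length) := by rw [← hpre']
    rw [hfix, hB2, pvRun_eq_pvRunN]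
    norm_num
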